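-- pv_equiv track=rewrite | github.com/Sibcgh/adventofcode2023 | day_10/day_10.py | bfs
-- ===== SOURCE A (Python) =====
-- from collections import defaultdict, deque
--
-- def bfs(start_indx, graph):
--     """Breadth-First Search to compute distances and loop."""
--     visited = set([start_indx])
--     queue = deque([(start_indx, 0)])
--     dists = {}
--     max_steps = 0
--
--     while queue:
--         current_indx, steps = queue.popleft()
--         max_steps = steps
--         dists[current_indx] = steps
--
--         for next_pos in graph[current_indx]:
--             if next_pos not in visited:
--                 visited.add(next_pos)
--                 queue.append((next_pos, steps + 1))
--
--     loop = set(dists.keys())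
--     return max_steps, loop
-- ===== SOURCE B (Python) =====
-- def _level_table(dists, frontier, dist):
--     """Record a whole BFS level in dists."""
--     for node in frontier:
--         dists[node] = dist
--     return dists
--
-- def _level_candidates(graph, frontier):
--     """All neighbours of a whole BFS level, with repeats."""
--     return [m for node in frontier for m in graph[node]]
--
-- def bfs(start_indx, graph):
--     """Level-synchronous BFS in staged passes per level: record the whole level in
--     dists, expand all neighbours in one pass, then dedup into the next frontier;
--     the max distance is read off the level counter after the loop instead of being
--     tracked per popped node."""
--     visited = {start_indx}
--     frontier = [start_indx]
--     dists = {}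
--     dist = 0
--     while frontier:
--         nxt = []
--         for m in _level_candidates(graph, frontier):
--             if m not in visited:
--                 visited.add(m)
--                 nxt.append(m)
--         dists = _level_table(dists, frontier, dist)
--         frontier = nxt
--         dist += 1
--     return dist - 1, set(dists)
-- ===== Notes on version B (the rewrite author's own statement) =====
-- stated objective: alternative
-- what changed: Replaces A's FIFO queue of (node, depth) pairs and per-pop max/dists bookkeeping by a level-synchronous BFS in staged passes: each round records the whole frontier in dists, flat-maps all neighbours into one candidate list, dedups it into the next frontier, and the max distance is read off the level counter after the loop.
import Mathlib
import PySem

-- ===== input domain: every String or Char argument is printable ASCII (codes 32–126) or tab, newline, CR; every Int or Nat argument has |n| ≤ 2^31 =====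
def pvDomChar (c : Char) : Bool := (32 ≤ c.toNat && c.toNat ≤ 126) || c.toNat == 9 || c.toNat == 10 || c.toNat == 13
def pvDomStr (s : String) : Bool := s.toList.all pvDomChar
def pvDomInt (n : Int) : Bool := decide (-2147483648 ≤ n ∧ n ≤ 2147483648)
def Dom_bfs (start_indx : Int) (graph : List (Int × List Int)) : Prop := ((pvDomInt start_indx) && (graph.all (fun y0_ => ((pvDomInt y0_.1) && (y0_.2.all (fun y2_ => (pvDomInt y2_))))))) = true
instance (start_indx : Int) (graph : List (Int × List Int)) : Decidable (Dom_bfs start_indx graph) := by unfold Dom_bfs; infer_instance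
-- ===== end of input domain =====

-- B replaces A's FIFO queue of (node, depth) pairs by a level-synchronous BFS in staged
-- passes per level (record level, flat-map neighbours, dedup), reading the max distance
-- off the level counter (objective: alternative decomposition, same asymptotic cost).
-- Return value only; no argument is mutated.

-- shared helper: graph[n] (dict lookup; Pre_bfs guarantees the key exists)
def pvAdj (graph : List (Int × List Int)) (n : Int) : List Int :=
  (PySem.Dict.mk graph).getD n []

-- termination machinery cited by the ports' `decreasing_by` (the measure: unvisited nodes, then queue length)
def pvUniv (graph : List (Int × List Int)) : Finset Int := (graph.flatMap (fun p => p.2)).toFinset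

def pvMeas (graph : List (Int × List Int)) (visited : PySem.Set Int) (n : Nat) : Nat :=
  2 * ((pvUniv graph) \ visited.toFinset).card + n

theorem pvAdj_nil (n : Int) : pvAdj [] n = [] := by
  simp [pvAdj, PySem.Dict.getD, PySem.Dict.get?]

theorem pvAdj_cons (k n : Int) (l : List Int) (g : List (Int × List Int)) :
    pvAdj ((k, l) :: g) n = if k == n then l else pvAdj g n := by
  simp only [pvAdj, PySem.Dict.getD_eq_get?_getD, PySem.Dict.get?_mk_cons]
  split <;> simp

theorem pvAdj_subset (graph : List (Int × List Int)) (n m : Int)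
    (h : m ∈ pvAdj graph n) : m ∈ pvUniv graph := by
  induction graph with
  | nil => rw [pvAdj_nil] at h; cases h
  | cons p g ih =>
    obtain ⟨k, l⟩ := p
    rw [pvAdj_cons] at h
    simp only [pvUniv, List.flatMap_cons, List.toFinset_append, Finset.mem_union, List.mem_toFinset]
    by_cases hk : (k == n)
    · rw [if_pos hk] at h; exact Or.inl h
    · rw [if_neg hk] at h
      exact Or.inr (by simpa [pvUniv, List.mem_toFinset] using ih h)

-- the loop body of A's inner `for next_pos in graph[current_indx]`
def pvStepA (steps : Int) (s : PySem.Set Int × List (Int × Int)) (m : Int) :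
    PySem.Set Int × List (Int × Int) :=
  if m ∈ s.1 then s else (PySem.Set.add s.1 m, s.2 ++ [(m, steps + 1)])

theorem pvMeas_add (graph : List (Int × List Int)) (v : PySem.Set Int) (m : Int)
    (hm : m ∈ pvUniv graph) (hv : ¬ m ∈ v) (n : Nat) :
    pvMeas graph (PySem.Set.add v m) (n + 1) ≤ pvMeas graph v n := by
  have hadd : PySem.Set.add v m = v ++ [m] := by simp [PySem.Set.add, hv]
  have hins : (v ++ [m]).toFinset = insert m v.toFinset := by
    simp [List.toFinset_append]
  have hmem : m ∈ pvUniv graph \ v.toFinset :=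
    Finset.mem_sdiff.mpr ⟨hm, by simpa [List.mem_toFinset] using hv⟩
  have hcard : (pvUniv graph \ (insert m v.toFinset)).card
      = (pvUniv graph \ v.toFinset).card - 1 := by
    rw [Finset.sdiff_insert, Finset.card_erase_of_mem hmem]
  have hpos : 0 < (pvUniv graph \ v.toFinset).card := Finset.card_pos.mpr ⟨m, hmem⟩
  simp only [pvMeas, hadd, hins, hcard]
  omega

theorem pvFoldMeasA (graph : List (Int × List Int)) (d : Int) :
    ∀ (ns : List Int) (v : PySem.Set Int) (q : List (Int × Int)),
    (∀ m ∈ ns, m ∈ pvUniv graph) →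
    pvMeas graph (ns.foldl (pvStepA d) (v, q)).1 (ns.foldl (pvStepA d) (v, q)).2.length
      ≤ pvMeas graph v q.length := by
  intro ns
  induction ns with
  | nil => intro v q _; simp
  | cons m ns ih =>
    intro v q h
    by_cases hm : m ∈ v
    · simpa [pvStepA, hm] using ih v q (fun x hx => h x (by simp [hx]))
    · have h1 : pvStepA d (v, q) m = (PySem.Set.add v m, q ++ [(m, d + 1)]) := by
        simp [pvStepA, hm]
      calc pvMeas graph ((m :: ns).foldl (pvStepA d) (v, q)).1
              ((m :: ns).foldl (pvStepA d) (v, q)).2.length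
          ≤ pvMeas graph (PySem.Set.add v m) (q ++ [(m, d + 1)]).length := by
            simpa [h1] using ih (PySem.Set.add v m) (q ++ [(m, d + 1)])
              (fun x hx => h x (by simp [hx]))
        _ ≤ pvMeas graph v q.length := by
            simpa using pvMeas_add graph v m (h m (by simp)) hm q.length

-- ===== PORT A =====
-- the while-loop of A: FIFO queue of (node, steps) pairs
def bfsLoop (graph : List (Int × List Int)) (visited : PySem.Set Int)
    (queue : List (Int × Int)) (dists : PySem.Dict Int Int) (max_steps : Int) :
    Int × PySem.Dict Int Int :=
  match queue with
  | [] => (max_steps, dists)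
  | (current_indx, steps) :: rest =>
    let st := (pvAdj graph current_indx).foldl (pvStepA steps) (visited, rest)
    bfsLoop graph st.1 st.2 (dists.insert current_indx steps) steps
termination_by pvMeas graph visited queue.length
decreasing_by
  have h := pvFoldMeasA graph steps (pvAdj graph current_indx) visited rest
    (fun m hm => pvAdj_subset graph current_indx m hm)
  simp only [pvMeas] at h ⊢
  simp only [List.length_cons]
  omega

def bfs (start_indx : Int) (graph : List (Int × List Int)) : Int × List Int :=
  let r := bfsLoop graph (PySem.Set.ofList [start_indx]) [(start_indx, 0)] PySem.Dict.empty 0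
  (r.1, PySem.Set.ofList r.2.keys)

-- ===== PORT B =====
-- the body of B's dedup pass `for m in candidates: if m not in visited: …`
def markNew (acc : PySem.Set Int × List Int) (x : Int) : PySem.Set Int × List Int :=
  if x ∈ acc.1 then acc else (PySem.Set.add acc.1 x, acc.2 ++ [x])

theorem markNewMeas (g : List (Int × List Int)) :
    ∀ (xs : List Int) (seen : PySem.Set Int) (out : List Int),
    (∀ x ∈ xs, x ∈ pvUniv g) →
    pvMeas g (xs.foldl markNew (seen, out)).1 (xs.foldl markNew (seen, out)).2.length
      ≤ pvMeas g seen out.length := by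
  intro xs
  induction xs with
  | nil => intro seen out _; simp
  | cons x xs ih =>
    intro seen out h
    by_cases hx : x ∈ seen
    · simpa [markNew, hx] using ih seen out (fun y hy => h y (by simp [hy]))
    · have h1 : markNew (seen, out) x = (PySem.Set.add seen x, out ++ [x]) := by
        simp [markNew, hx]
      calc pvMeas g ((x :: xs).foldl markNew (seen, out)).1
              ((x :: xs).foldl markNew (seen, out)).2.length
          ≤ pvMeas g (PySem.Set.add seen x) (out ++ [x]).length := by
            simpa [h1] using ih (PySem.Set.add seen x) (out ++ [x])
              (fun y hy => h y (by simp [hy]))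
        _ ≤ pvMeas g seen out.length := by
            simpa using pvMeas_add g seen x (h x (by simp)) hx out.length

-- B's first two staged passes of a level, as named helpers:
-- `for node in frontier: dists[node] = dist` and `[m for node in frontier for m in graph[node]]`
def levelTable (tbl : PySem.Dict Int Int) (lvl : List Int) (k : Int) : PySem.Dict Int Int :=
  lvl.foldl (fun t node => t.insert node k) tbl

def levelCands (g : List (Int × List Int)) (lvl : List Int) : List Int :=
  lvl.flatMap (fun node => (PySem.Dict.mk g).getD node [])

-- the while-loop of B: one level per iteration, in three staged passes
def bfsAltLoop (g : List (Int × List Int)) (seen : PySem.Set Int)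
    (lvl : List Int) (tbl : PySem.Dict Int Int) (k : Int) :
    Int × PySem.Dict Int Int :=
  if lvl.isEmpty then (k - 1, tbl)
  else
    let st := (levelCands g lvl).foldl markNew (seen, [])
    bfsAltLoop g st.1 st.2 (levelTable tbl lvl k) (k + 1)
termination_by (pvUniv g \ seen.toFinset).card + ((pvUniv g \ seen.toFinset).card + lvl.length)
decreasing_by
  rename_i hne
  have h := markNewMeas g (levelCands g lvl) seen []
    (fun x hx => by
      obtain ⟨node, _, hmem⟩ := List.mem_flatMap.mp hx
      exact pvAdj_subset g node x hmem)
  have hpos : 0 < lvl.length := by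
    cases lvl with
    | nil => simp at hne
    | cons a l => simp
  simp only [pvMeas, List.length_nil] at h ⊢
  omega

def bfs_alt (start_indx : Int) (graph : List (Int × List Int)) : Int × List Int :=
  let p := bfsAltLoop graph (PySem.Set.ofList [start_indx]) [start_indx] PySem.Dict.empty 0
  (p.fst, PySem.Set.ofList p.snd.keys)

-- ===== PRECONDITION & SPEC =====
-- closure of {start_indx} under 'key-to-key' edges (neighbours that are themselves keys); graph.length + 1
-- (graph.length.succ iterations reach the fixpoint: each non-final iteration adds one of the keys)
def pvKeyClosure (graph : List (Int × List Int)) (start_indx : Int) : PySem.Set Int :=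
  (List.range graph.length.succ).foldl
    (fun s _ => s.foldl
      (fun acc x => ((pvAdj graph x).filter (fun n => decide (n ∈ graph.map Prod.fst))).foldl
        PySem.Set.add acc) s)
    (PySem.Set.ofList [start_indx])

-- Pre_ admits exactly the inputs where A returns: start_indx is a key and every neighbour of every node
-- the BFS can reach (closure of the edge relation over the input, stated without running either port) is
-- a key — A raises KeyError at the first reached non-key.
def Pre_bfs (start_indx : Int) (graph : List (Int × List Int)) : Prop :=
  start_indx ∈ graph.map Prod.fst ∧
  ∀ x ∈ pvKeyClosure graph start_indx, ∀ n ∈ pvAdj graph x, n ∈ graph.map Prod.fst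

instance (start_indx : Int) (graph : List (Int × List Int)) : Decidable (Pre_bfs start_indx graph) := by
  unfold Pre_bfs; infer_instance

def pvWitness_bfs : Int × (List (Int × List Int)) := (0, [(0, [1]), (1, [0, 2])] ++ [(2, [])])

def Spec_bfs (start_indx : Int) (graph : List (Int × List Int)) (out : Int × List Int) : Prop := out = bfs_alt start_indx graph
instance (start_indx : Int) (graph : List (Int × List Int)) (out : Int × List Int) : Decidable (Spec_bfs start_indx graph out) := by unfold Spec_bfs; infer_instance

-- ===== CLAIM (what is proved, stated in full; the proofs are below) =====
def Claim_equal_bfs : Prop := ∀ (start_indx : Int) (graph : List (Int × List Int)), Dom_bfs start_indx graph → Pre_bfs start_indx graph → Spec_bfs start_indx graph (bfs start_indx graph)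

-- ===== LEMMAS AND PROOFS =====

-- A's inner fold over one node, with the pairs projected down to B's pair-free dedup fold
theorem innerRel (d : Int) :
    ∀ (ns : List Int) (v : PySem.Set Int) (X : List (Int × Int)) (l : List Int),
    ns.foldl (pvStepA d) (v, X ++ l.map (fun n => (n, d + 1)))
      = ((ns.foldl markNew (v, l)).1,
         X ++ (ns.foldl markNew (v, l)).2.map (fun n => (n, d + 1))) := by
  intro ns
  induction ns with
  | nil => intro v X l; rfl
  | cons m ns ih =>
    intro v X l
    by_cases hm : m ∈ v
    · simp [pvStepA, markNew, hm, ih]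
    · have h1 : (X ++ l.map (fun n => (n, d + 1))) ++ [(m, d + 1)]
          = X ++ (l ++ [m]).map (fun n => (n, d + 1)) := by
        simp [List.map_append]
      simp only [List.foldl_cons, pvStepA, markNew, hm, ite_false]
      rw [h1]
      exact ih (PySem.Set.add v m) X (l ++ [m])

-- A's processing of one whole level fr (queued at depth d, with nxt already queued at d+1)
-- equals: insert all of fr into dists, dedup-fold the flat-mapped neighbours, keep depth d as max
theorem bridge (graph : List (Int × List Int)) (d : Int) :
    ∀ (fr nxt : List Int) (v : PySem.Set Int) (dd : PySem.Dict Int Int) (maxv : Int),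
    bfsLoop graph v (fr.map (fun n => (n, d)) ++ nxt.map (fun n => (n, d + 1))) dd maxv
      = bfsLoop graph ((fr.flatMap (fun node => pvAdj graph node)).foldl markNew (v, nxt)).1
          (((fr.flatMap (fun node => pvAdj graph node)).foldl markNew (v, nxt)).2.map
            (fun n => (n, d + 1)))
          (fr.foldl (fun dd node => dd.insert node d) dd)
          (if fr = [] then maxv else d) := by
  intro fr
  induction fr with
  | nil => intro nxt v dd maxv; simp
  | cons c cs ih =>
    intro nxt v dd maxv
    have hq : (c :: cs).map (fun n => (n, d)) ++ nxt.map (fun n => (n, d + 1))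
        = (c, d) :: (cs.map (fun n => (n, d)) ++ nxt.map (fun n => (n, d + 1))) := by
      simp
    rw [hq, bfsLoop]
    rw [innerRel d (pvAdj graph c) v (cs.map (fun n => (n, d))) nxt]
    rw [ih ((pvAdj graph c).foldl markNew (v, nxt)).2 ((pvAdj graph c).foldl markNew (v, nxt)).1
      (dd.insert c d) d]
    simp only [List.flatMap_cons, List.foldl_append, List.foldl_cons]
    rw [ite_self, if_neg (List.cons_ne_nil c cs)]

-- the main simulation: B's level loop at depth d equals A's queue loop on that level queued at d,
-- with A's running max playing the role of B's `dist - 1`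
theorem mainRel (graph : List (Int × List Int)) :
    ∀ (v : PySem.Set Int) (fr : List Int) (dd : PySem.Dict Int Int) (d : Int),
    bfsAltLoop graph v fr dd d
      = bfsLoop graph v (fr.map (fun n => (n, d))) dd (d - 1) := by
  intro v fr dd d
  induction v, fr, dd, d using bfsAltLoop.induct graph with
  | case1 v fr dd d hemp =>
    have : fr = [] := List.isEmpty_iff.mp hemp
    subst this
    rw [bfsAltLoop]
    simp only [List.isEmpty_nil, if_true, List.map_nil]
    rw [bfsLoop]
  | case2 v fr dd d hemp st ih =>
    obtain ⟨f, fs, rfl⟩ : ∃ a l, fr = a :: l := by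
      cases fr with
      | nil => simp at hemp
      | cons a l => exact ⟨a, l, rfl⟩
    have hst : st = ((f :: fs).flatMap (fun node => pvAdj graph node)).foldl markNew (v, []) := rfl
    have hdd : levelTable dd (f :: fs) d = (f :: fs).foldl (fun t node => t.insert node d) dd := rfl
    have h := bridge graph d (f :: fs) [] v dd (d - 1)
    simp only [List.map_nil, List.append_nil, List.cons_ne_nil, ite_false] at h
    rw [bfsAltLoop]
    simp only [List.isEmpty_cons, if_false, Bool.false_eq_true]
    rw [ih, hst, hdd]
    have hd1 : d + 1 - 1 = d := by omega
    rw [hd1]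
    exact h.symm

-- ===== VERDICT (by name: the statement is the Claim_ definition above) =====
theorem bfs_spec : Claim_equal_bfs := by
  intro start_indx graph _ _
  unfold Spec_bfs bfs bfs_alt
  rw [mainRel graph (PySem.Set.ofList [start_indx]) [start_indx] PySem.Dict.empty 0]
  have h0 := bridge graph 0 [start_indx] [] (PySem.Set.ofList [start_indx]) PySem.Dict.empty 0
  have h1 := bridge graph 0 [start_indx] [] (PySem.Set.ofList [start_indx]) PySem.Dict.empty (0 - 1)
  simp only [List.map_nil, List.append_nil, List.cons_ne_nil, ite_false] at h0 h1
  simp only [List.map_cons, List.map_nil] at h0 h1 ⊢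
  rw [h0, h1]
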